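-- pv_equiv track=rewrite | github.com/ioanamoflic/pandora | surface_code_toffoli_experiment.py | _cancel_adjacent_equal_triples
-- ===== SOURCE A (Python) =====
-- from typing import List, Tuple
--
-- def _cancel_adjacent_equal_triples(triples: List[tuple[int, int, int]]) -> List[tuple[int, int, int]]:
--     stack: List[tuple[int, int, int]] = []
--     for t in triples:
--         if stack and stack[-1] == t:
--             stack.pop()
--         else:
--             stack.append(t)
--     return stack
-- ===== SOURCE B (Python) =====
-- from typing import List, Tuple
--
--
-- def _one_pass(xs):
--     """One left-to-right sweep removing non-overlapping adjacent equal pairs."""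
--     out = []
--     i = 0
--     n = len(xs)
--     while i < n:
--         if i + 1 < n and xs[i] == xs[i + 1]:
--             i += 2
--         else:
--             out.append(xs[i])
--             i += 1
--     return out
--
--
-- def _cancel_adjacent_equal_triples(triples: List[tuple[int, int, int]]) -> List[tuple[int, int, int]]:
--     cur = list(triples)
--     while True:
--         nxt = _one_pass(cur)
--         if nxt == cur:
--             return cur
--         cur = nxt
-- ===== Notes on version B (the rewrite author's own statement) =====
-- stated objective: alternative
-- what changed: Replaces the single stack pass with a stack-free repeated-scan fixpoint: each sweep drops non-overlapping adjacent equal pairs, iterated until a sweep removes nothing; confluence of this rewriting gives the same result.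
import Mathlib
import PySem

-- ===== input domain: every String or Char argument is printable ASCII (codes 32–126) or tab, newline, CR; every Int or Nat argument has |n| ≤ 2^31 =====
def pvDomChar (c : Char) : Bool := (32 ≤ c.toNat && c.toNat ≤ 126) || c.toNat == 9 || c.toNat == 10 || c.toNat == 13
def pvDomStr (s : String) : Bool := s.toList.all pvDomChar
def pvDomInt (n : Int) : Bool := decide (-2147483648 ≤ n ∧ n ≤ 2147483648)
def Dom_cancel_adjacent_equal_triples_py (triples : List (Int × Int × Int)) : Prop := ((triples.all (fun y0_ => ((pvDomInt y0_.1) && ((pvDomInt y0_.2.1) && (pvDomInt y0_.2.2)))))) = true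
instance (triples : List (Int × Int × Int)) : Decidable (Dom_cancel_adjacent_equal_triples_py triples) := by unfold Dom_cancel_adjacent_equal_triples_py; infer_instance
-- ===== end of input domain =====

-- B replaces A's single stack pass by a stack-free repeated-scan fixpoint (remove
-- non-overlapping adjacent equal pairs each sweep until stable); alternative algorithm, not faster.


-- ===== PORT A =====
-- loop body of A: `if stack and stack[-1] == t: stack.pop() else: stack.append(t)`
def pvAStep (stack : List (Int × Int × Int)) (t : Int × Int × Int) : List (Int × Int × Int) :=
  if stack ≠ [] ∧ stack.getLast? = some t then stack.dropLast else stack ++ [t]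

def cancel_adjacent_equal_triples_py (triples : List (Int × Int × Int)) : List (Int × Int × Int) :=
  triples.foldl pvAStep []

-- ===== PORT B =====
-- one sweep of Source B's `_one_pass`: drop non-overlapping adjacent equal pairs
def pvOnePass : List (Int × Int × Int) → List (Int × Int × Int)
  | a :: b :: rest => if a = b then pvOnePass rest else a :: pvOnePass (b :: rest)
  | l => l

theorem pvOnePass_length_le (l : List (Int × Int × Int)) : (pvOnePass l).length ≤ l.length := by
  fun_induction pvOnePass l with
  | case1 b rest ih => simp; omega
  | case2 a b rest hab ih => simp_all
  | case3 l _ => exact le_refl _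

theorem pvOnePass_length_lt (l : List (Int × Int × Int)) :
    pvOnePass l ≠ l → (pvOnePass l).length < l.length := by
  fun_induction pvOnePass l with
  | case1 b rest ih =>
      intro _
      have := pvOnePass_length_le rest
      simp; omega
  | case2 a b rest hab ih =>
      intro h
      have h' : pvOnePass (b :: rest) ≠ b :: rest := fun he => h (by rw [he])
      have := ih h'
      simp only [List.length_cons] at this ⊢; omega
  | case3 l _ => intro h'; exact absurd rfl h'

-- Source B's outer `while True` loop: iterate the sweep to a fixpoint
def pvFix (l : List (Int × Int × Int)) : List (Int × Int × Int) :=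
  if h : pvOnePass l = l then l else pvFix (pvOnePass l)
termination_by l.length
decreasing_by exact pvOnePass_length_lt l h

def cancel_adjacent_equal_triples_py_alt (triples : List (Int × Int × Int)) : List (Int × Int × Int) :=
  pvFix triples

-- ===== PRECONDITION & SPEC =====
def Spec_cancel_adjacent_equal_triples_py (triples : List (Int × Int × Int)) (out : List (Int × Int × Int)) : Prop := out = cancel_adjacent_equal_triples_py_alt triples
instance (triples : List (Int × Int × Int)) (out : List (Int × Int × Int)) : Decidable (Spec_cancel_adjacent_equal_triples_py triples out) := by unfold Spec_cancel_adjacent_equal_triples_py; infer_instance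

-- ===== CLAIM (what is proved, stated in full; the proofs are below) =====
def Claim_equal_cancel_adjacent_equal_triples_py : Prop := ∀ (triples : List (Int × Int × Int)), Dom_cancel_adjacent_equal_triples_py triples → Spec_cancel_adjacent_equal_triples_py triples (cancel_adjacent_equal_triples_py triples)

-- ===== LEMMAS AND PROOFS =====

-- A's stack never contains two adjacent equal elements, and pvAStep preserves that.
theorem pvAStep_chain {s : List (Int × Int × Int)} (t : Int × Int × Int)
    (h : s.IsChain (· ≠ ·)) : (pvAStep s t).IsChain (· ≠ ·) := by
  unfold pvAStep
  split
  · exact h.dropLast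
  · next hc =>
      refine List.isChain_append.2 ⟨h, by simp, ?_⟩
      intro x hx y hy
      simp only [List.head?_cons, Option.mem_def, Option.some.injEq] at hy
      subst hy
      simp only [Option.mem_def] at hx
      intro he
      exact hc ⟨by intro h0; rw [h0] at hx; simp at hx, he ▸ hx⟩

-- Pushing-then-popping (or popping-then-repushing) the same element is the identity
-- on stacks without adjacent equal elements.
theorem pvAStep_step {s : List (Int × Int × Int)} (t : Int × Int × Int)
    (h : s.IsChain (· ≠ ·)) : pvAStep (pvAStep s t) t = s := by
  by_cases hc : s ≠ [] ∧ s.getLast? = some t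
  · obtain ⟨ys, rfl⟩ : ∃ ys, s = ys ++ [t] := List.getLast?_eq_some_iff.mp hc.2
    have h1 : pvAStep (ys ++ [t]) t = ys := by
      unfold pvAStep; rw [if_pos hc, List.dropLast_concat]
    rw [h1]
    unfold pvAStep
    rw [if_neg]
    intro ⟨hne, hlast⟩
    have hrel := (List.isChain_append.1 h).2.2
    exact hrel t (by simp [Option.mem_def, hlast]) t (by simp) rfl
  · have h1 : pvAStep s t = s ++ [t] := by unfold pvAStep; rw [if_neg hc]
    rw [h1]
    unfold pvAStep
    rw [if_pos ⟨by simp, by simp⟩, List.dropLast_concat]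

theorem foldl_pvOnePass (l : List (Int × Int × Int)) :
    ∀ s : List (Int × Int × Int), s.IsChain (· ≠ ·) →
      List.foldl pvAStep s (pvOnePass l) = List.foldl pvAStep s l := by
  fun_induction pvOnePass l with
  | case1 b rest ih =>
      intro s hs
      rw [ih s hs]
      simp only [List.foldl_cons]
      rw [pvAStep_step b hs]
  | case2 a b rest hab ih =>
      intro s hs
      simp only [List.foldl_cons]
      exact ih (pvAStep s a) (pvAStep_chain a hs)
  | case3 l h => intro s _; rfl

-- A fixpoint of the sweep has no adjacent equal elements.
theorem pvOnePass_fix_chain (l : List (Int × Int × Int)) :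
    pvOnePass l = l → l.IsChain (· ≠ ·) := by
  fun_induction pvOnePass l with
  | case1 b rest ih =>
      intro h
      exfalso
      have h1 := pvOnePass_length_le rest
      have h2 : (pvOnePass rest).length = (b :: b :: rest).length := by rw [h]
      simp at h2; omega
  | case2 a b rest hab ih =>
      intro h
      have h' : pvOnePass (b :: rest) = b :: rest := (List.cons.injEq _ _ _ _).mp h |>.2
      exact List.isChain_cons_cons.mpr ⟨hab, ih h'⟩
  | case3 l h =>
      intro _
      match l, h with
      | [], _ => simp
      | [a], _ => simp
      | a :: b :: rest, h => exact (h a b rest rfl).elim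

-- On a list with no adjacent equal elements the stack pass is the identity.
theorem foldl_irred (l : List (Int × Int × Int)) :
    ∀ s : List (Int × Int × Int), (s ++ l).IsChain (· ≠ ·) →
      List.foldl pvAStep s l = s ++ l := by
  induction l with
  | nil => intro s _; simp
  | cons a rest ih =>
      intro s hs
      have hstep : pvAStep s a = s ++ [a] := by
        rw [pvAStep]
        split
        · next hc =>
            exfalso
            obtain ⟨hne, hlast⟩ := hc
            rcases List.isChain_append.1 hs with ⟨_, _, hrel⟩
            exact hrel a hlast a (by simp) rfl
        · rfl
      rw [List.foldl_cons, hstep]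
      have := ih (s ++ [a]) (by simpa using hs)
      simpa using this

theorem cancel_eq_fix (l : List (Int × Int × Int)) :
    cancel_adjacent_equal_triples_py l = pvFix l := by
  fun_induction pvFix l with
  | case1 l h =>
      have hc := pvOnePass_fix_chain l h
      unfold cancel_adjacent_equal_triples_py
      simpa using foldl_irred l [] (by simpa using hc)
  | case2 l h ih =>
      unfold cancel_adjacent_equal_triples_py at *
      rw [← ih, ← foldl_pvOnePass l [] (by simp)]

-- ===== VERDICT (by name: the statement is the Claim_ definition above) =====
theorem cancel_adjacent_equal_triples_py_spec : Claim_equal_cancel_adjacent_equal_triples_py := by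
  intro triples _
  unfold Spec_cancel_adjacent_equal_triples_py cancel_adjacent_equal_triples_py_alt
  exact cancel_eq_fix triples
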